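-- pv_equiv track=rewrite | github.com/mars812-rumba/foodmarket | backend/web_integration.py | generate_restaurant_id
-- ===== SOURCE A (Python) =====
-- def generate_restaurant_id(name: str) -> str:
--     """Generate slug-based restaurant ID"""
--     slug = name.lower()
--     ru = {
--         'а': 'a', 'б': 'b', 'в': 'v', 'г': 'g', 'д': 'd', 'е': 'e', 'ё': 'e', 'ж': 'zh',
--         'з': 'z', 'и': 'i', 'й': 'y', 'к': 'k', 'л': 'l', 'м': 'm', 'н': 'n', 'о': 'o',
--         'п': 'p', 'р': 'r', 'с': 's', 'т': 't', 'у': 'u', 'ф': 'f', 'х': 'h', 'ц': 'c',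
--         'ч': 'ch', 'ш': 'sh', 'щ': 'shch', 'ы': 'y', 'э': 'e', 'ю': 'yu', 'я': 'ya'
--     }
--     slug = ''.join(c if c.isalnum() else '_' for c in slug)
--     slug = '_'.join(filter(None, slug.split('_')))
--     return slug
-- ===== SOURCE B (Python) =====
-- def generate_restaurant_id(name: str) -> str:
--     """Generate slug-based restaurant ID (single pass, no intermediate slug string)."""
--     words = []
--     run = []
--     for c in name.lower():
--         if c.isalnum():
--             run.append(c)
--         else:
--             if run:
--                 words.append(''.join(run))
--                 run = []
--     if run:
--         words.append(''.join(run))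
--     return '_'.join(words)
-- ===== Notes on version B (the rewrite author's own statement) =====
-- stated objective: simpler
-- what changed: Replaces A's three-stage pipeline (map non-alnum chars to '_', split on '_', filter empties, rejoin) by a single accumulator scan over the lowered string that collects maximal alnum runs directly, never building the underscore-masked intermediate string.
import Mathlib
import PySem

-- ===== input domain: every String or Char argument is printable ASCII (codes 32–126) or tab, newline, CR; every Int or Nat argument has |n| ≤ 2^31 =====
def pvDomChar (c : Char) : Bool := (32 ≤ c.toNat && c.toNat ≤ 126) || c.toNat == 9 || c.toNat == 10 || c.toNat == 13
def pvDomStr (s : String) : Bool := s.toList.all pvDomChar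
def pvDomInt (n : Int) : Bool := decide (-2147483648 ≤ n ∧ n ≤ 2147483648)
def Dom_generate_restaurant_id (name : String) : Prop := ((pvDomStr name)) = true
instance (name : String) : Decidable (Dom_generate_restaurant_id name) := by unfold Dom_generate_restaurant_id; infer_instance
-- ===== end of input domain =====

-- B replaces A's map-to-underscore + split/filter/join pipeline by a single accumulator
-- scan over the lowered characters (objective: simpler, one pass, no intermediate slug string).


-- ===== PORT A =====
-- slug = name.lower(); map non-alnum chars to '_'; '_'.join(filter(None, slug.split('_')))
-- (the 'ru' dict of A is defined but never used; it is omitted here as it has no effect)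
def generate_restaurant_id (name : String) : String :=
  let slug := PySem.Chars.lower name.toList
  let slug := slug.map (fun c => if PySem.Chars.isalnum c then c else '_')
  let slug := PySem.Chars.join ['_']
    ((PySem.Chars.splitOn slug ['_']).filter (fun w => !w.isEmpty))
  String.ofList slug

-- ===== PORT B =====
-- one pass over the lowered chars: grow the current alnum run, flush it on a non-alnum char
def generate_restaurant_id_alt (name : String) : String :=
  let step := fun (st : List (List Char) × List Char) (c : Char) =>
    if PySem.Chars.isalnum c then (st.1, st.2 ++ [c])
    else if st.2.isEmpty then st else (st.1 ++ [st.2], ([] : List Char))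
  let st := (PySem.Chars.lower name.toList).foldl step ([], [])
  let words := if st.2.isEmpty then st.1 else st.1 ++ [st.2]
  String.ofList (PySem.Chars.join ['_'] words)

-- ===== PRECONDITION & SPEC =====
def Spec_generate_restaurant_id (name : String) (out : String) : Prop := out = generate_restaurant_id_alt name
instance (name : String) (out : String) : Decidable (Spec_generate_restaurant_id name out) := by unfold Spec_generate_restaurant_id; infer_instance

-- ===== CLAIM (what is proved, stated in full; the proofs are below) =====
def Claim_equal_generate_restaurant_id : Prop := ∀ (name : String), Dom_generate_restaurant_id name → Spec_generate_restaurant_id name (generate_restaurant_id name)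

-- ===== LEMMAS AND PROOFS =====

-- proof-side spec of splitOn on the single-char separator '_' (current piece accumulated reversed)
def pvS : List Char → List Char → List (List Char)
  | [], cur => [cur.reverse]
  | c :: rest, cur => if c = '_' then cur.reverse :: pvS rest [] else pvS rest (c :: cur)

-- proof-side spec of the run decomposition (current run carried in order)
def pvR : List Char → List Char → List (List Char)
  | [], run => if run.isEmpty then [] else [run]
  | c :: rest, run =>
    if PySem.Chars.isalnum c then pvR rest (run ++ [c])
    else if run.isEmpty then pvR rest [] else run :: pvR rest []

theorem pv_go_eq (fuel : Nat) (l cur : List Char) (acc : List (List Char))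
    (h : l.length < fuel) :
    PySem.Chars.splitOn.go ['_'] fuel l cur acc = acc.reverse ++ pvS l cur := by
  induction fuel generalizing l cur acc with
  | zero => omega
  | succ n ih =>
    cases l with
    | nil => simp [PySem.Chars.splitOn.go, pvS]
    | cons c rest =>
      rw [PySem.Chars.splitOn.go]
      by_cases hc : c = '_'
      · subst hc
        simp [List.isPrefixOf, pvS, ih rest [] _ (by simpa using Nat.lt_of_succ_lt_succ h)]
      · simp [List.isPrefixOf, hc, Ne.symm hc, pvS,
              ih rest (c::cur) acc (by simpa using Nat.lt_of_succ_lt_succ h)]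

theorem pv_splitOn_eq (l : List Char) :
    PySem.Chars.splitOn l ['_'] = pvS l [] := by
  have := pv_go_eq (l.length + 1) l [] [] (by omega)
  simpa [PySem.Chars.splitOn] using this

-- the A side: splitting the '_'-masked string and dropping empties yields the runs
theorem pv_filter_S (cs cur : List Char) :
    (pvS (cs.map (fun c => if PySem.Chars.isalnum c then c else '_')) cur).filter
        (fun w => !w.isEmpty) = pvR cs cur.reverse := by
  induction cs generalizing cur with
  | nil =>
    by_cases h : cur = [] <;> simp [pvS, pvR, h]
  | cons c rest ih =>
    by_cases h : PySem.Chars.isalnum c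
    · have hc : c ≠ '_' := by
        intro e; subst e; exact absurd h (by decide)
      simp [pvS, pvR, h, hc, ih (c :: cur)]
    · by_cases hcur : cur = [] <;>
        simp [pvS, pvR, h, hcur, ih ([] : List Char)]

-- the B side: the accumulator scan computes the runs
theorem pv_foldl_R (cs : List Char) (ws : List (List Char)) (run : List Char) :
    (let st := cs.foldl
        (fun (st : List (List Char) × List Char) (c : Char) =>
          if PySem.Chars.isalnum c then (st.1, st.2 ++ [c])
          else if st.2.isEmpty then st else (st.1 ++ [st.2], ([] : List Char)))
        (ws, run)
      if st.2.isEmpty then st.1 else st.1 ++ [st.2]) = ws ++ pvR cs run := by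
  induction cs generalizing ws run with
  | nil => by_cases h : run.isEmpty <;> simp_all [pvR]
  | cons c rest ih =>
    by_cases h : PySem.Chars.isalnum c
    · simpa [h, pvR] using ih ws (run ++ [c])
    · by_cases hr : run = []
      · subst hr; simpa [h, pvR] using ih ws []
      · simpa [h, hr, pvR] using ih (ws ++ [run]) []

-- ===== VERDICT (by name: the statement is the Claim_ definition above) =====
theorem generate_restaurant_id_spec : Claim_equal_generate_restaurant_id := by
  intro name _
  unfold Spec_generate_restaurant_id generate_restaurant_id generate_restaurant_id_alt
  simp only [pv_splitOn_eq, pv_foldl_R]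
  rw [show ([] : List Char) = ([] : List Char).reverse from rfl, pv_filter_S]
  simp
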